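-- pv_equiv track=rewrite | github.com/DaveSteadman/MiniAgentFramework | testcode/test_analyzer.py | _extract_validation_result
-- ===== SOURCE A (Python) =====
-- def _extract_validation_result(sections: dict[str, str]) -> str:
--     """Return 'PASS', 'FAIL', or 'UNKNOWN' from the last VALIDATION section."""
--     result = "UNKNOWN"
--     for title, body in sections.items():
--         if "VALIDATION" in title:
--             low = body.lower()
--             if "validation passed" in low or "orchestration succeeded" in low:
--                 result = "PASS"
--             elif "validation" in low:
--                 result = "FAIL"
--     return result
-- ===== SOURCE B (Python) =====
-- def _extract_validation_result(sections: dict[str, str]) -> str: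
--     """Return 'PASS', 'FAIL', or 'UNKNOWN' from the last VALIDATION section."""
--     for title, body in reversed(sections.items()):
--         if "VALIDATION" in title:
--             low = body.lower()
--             if "validation passed" in low or "orchestration succeeded" in low:
--                 return "PASS"
--             if "validation" in low:
--                 return "FAIL"
--     return "UNKNOWN"
-- ===== Notes on version B (the rewrite author's own statement) =====
-- stated objective: alternative
-- what changed: Replaces A's forward overwrite-accumulator scan over all sections with a reverse early-exit search that returns at the last section containing a trigger phrase.
import Mathlib
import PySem

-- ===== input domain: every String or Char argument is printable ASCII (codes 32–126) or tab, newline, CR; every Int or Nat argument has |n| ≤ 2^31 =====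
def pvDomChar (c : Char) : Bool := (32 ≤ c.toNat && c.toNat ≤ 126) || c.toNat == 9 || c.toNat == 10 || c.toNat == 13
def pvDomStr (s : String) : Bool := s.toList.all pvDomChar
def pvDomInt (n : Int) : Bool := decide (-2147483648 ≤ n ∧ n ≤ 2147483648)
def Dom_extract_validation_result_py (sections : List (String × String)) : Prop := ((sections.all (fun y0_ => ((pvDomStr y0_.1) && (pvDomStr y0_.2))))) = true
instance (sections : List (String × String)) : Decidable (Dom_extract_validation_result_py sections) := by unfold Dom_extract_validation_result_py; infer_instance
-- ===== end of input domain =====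

-- B replaces A's forward overwrite-accumulator scan with a reverse early-exit search (alternative decomposition, same cost).


-- ===== PORT A =====
-- result = "UNKNOWN"; for title, body in sections.items(): overwrite result when a trigger phrase is found
def extract_validation_result_py (sections : List (String × String)) : String :=
  sections.foldl (fun result tb =>
    if PySem.Str.isIn "VALIDATION" tb.1 then
      let low := PySem.Str.lower tb.2
      if PySem.Str.isIn "validation passed" low || PySem.Str.isIn "orchestration succeeded" low then "PASS"
      else if PySem.Str.isIn "validation" low then "FAIL"
      else result
    else result) "UNKNOWN"

-- ===== PORT B =====
-- for title, body in reversed(sections.items()): early return on the first (from the end) trigger phrase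
def extractValidationGo : List (String × String) → String
  | [] => "UNKNOWN"
  | tb :: rest =>
    if PySem.Str.isIn "VALIDATION" tb.1 then
      let low := PySem.Str.lower tb.2
      if PySem.Str.isIn "validation passed" low || PySem.Str.isIn "orchestration succeeded" low then "PASS"
      else if PySem.Str.isIn "validation" low then "FAIL"
      else extractValidationGo rest
    else extractValidationGo rest

def extract_validation_result_py_alt (sections : List (String × String)) : String :=
  extractValidationGo sections.reverse

-- ===== PRECONDITION & SPEC =====
def Spec_extract_validation_result_py (sections : List (String × String)) (out : String) : Prop := out = extract_validation_result_py_alt sections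
instance (sections : List (String × String)) (out : String) : Decidable (Spec_extract_validation_result_py sections out) := by unfold Spec_extract_validation_result_py; infer_instance

-- ===== CLAIM (what is proved, stated in full; the proofs are below) =====
def Claim_equal_extract_validation_result_py : Prop := ∀ (sections : List (String × String)), Dom_extract_validation_result_py sections → Spec_extract_validation_result_py sections (extract_validation_result_py sections)

-- ===== LEMMAS AND PROOFS =====

-- The key invariant: A's fold from any accumulator r equals B's reverse search,
-- except that B's "UNKNOWN" base case stands for "accumulator unchanged".
theorem extract_validation_go_eq (sections : List (String × String)) (r : String) :
    sections.foldl (fun result tb =>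
      if PySem.Str.isIn "VALIDATION" tb.1 then
        let low := PySem.Str.lower tb.2
        if PySem.Str.isIn "validation passed" low || PySem.Str.isIn "orchestration succeeded" low then "PASS"
        else if PySem.Str.isIn "validation" low then "FAIL"
        else result
      else result) r
    = (if extractValidationGo sections.reverse = "UNKNOWN" then r
       else extractValidationGo sections.reverse) := by
  induction sections using List.reverseRecOn generalizing r with
  | nil => simp [extractValidationGo]
  | append_singleton xs tb ih =>
      rw [List.foldl_append, List.foldl_cons, List.foldl_nil, List.reverse_append]
      simp only [List.reverse_singleton, List.singleton_append, extractValidationGo]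
      by_cases h1 : PySem.Str.isIn "VALIDATION" tb.1 = true
      · simp only [h1, if_true]
        by_cases h2 : (PySem.Str.isIn "validation passed" (PySem.Str.lower tb.2)
            || PySem.Str.isIn "orchestration succeeded" (PySem.Str.lower tb.2)) = true
        · simp only [h2, if_true]
          rw [if_neg (by decide : ¬ ("PASS" : String) = "UNKNOWN")]
        · simp only [h2, Bool.false_eq_true, if_false]
          by_cases h3 : PySem.Str.isIn "validation" (PySem.Str.lower tb.2) = true
          · simp only [h3, if_true]
            rw [if_neg (by decide : ¬ ("FAIL" : String) = "UNKNOWN")]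
          · simp only [h3, Bool.false_eq_true, if_false]
            exact ih r
      · simp only [h1, Bool.false_eq_true, if_false]
        exact ih r

-- ===== VERDICT (by name: the statement is the Claim_ definition above) =====
theorem extract_validation_result_py_spec : Claim_equal_extract_validation_result_py := by
  intro sections _
  unfold Spec_extract_validation_result_py extract_validation_result_py extract_validation_result_py_alt
  rw [extract_validation_go_eq]
  split <;> simp_all
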